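-- pv_equiv track=rewrite | github.com/bsweat/python-projects | dnaSequencing.py | findLargestOverlap
-- ===== SOURCE A (Python) =====
-- def strandsAreEqualLengths(strand1,strand2):
--     len1 = len(strand1)
--     len2 = len(strand2)
--     equal = bool(len1 == len2)
--     return equal
--
-- def findLargestOverlap(target,candidate):
--     equality = strandsAreEqualLengths(target,candidate)
--     if equality == True and target != '':
--         length = len(target)
--         lengthlist = range(0,length+1)
--         longest = 0
--         for x in lengthlist:
--             overlaps = 0
--             overlapBool = False
--             if target[-x:] == candidate[0:x]:
--                 overlapBool = True
--             else:
--                 overlapBool = False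
--             if overlapBool == True:
--                 if x > longest:
--                     longest = x
--                 else:
--                     pass
--             else:
--                 pass
--         return longest
--         #longest type  = int
--
--     else:
--         return -1
-- ===== SOURCE B (Python) =====
-- def findLargestOverlap(target, candidate):
--     if len(target) != len(candidate) or target == '':
--         return -1
--     i = 0
--     while not candidate.startswith(target[i:]):
--         i += 1
--     return len(target) - i
-- ===== Notes on version B (the rewrite author's own statement) =====
-- stated objective: simpler
-- what changed: B replaces A's exhaustive loop over every overlap length x with a running maximum by an early-exit forward scan over start positions i of the target, returning len(target)-i at the first suffix target[i:] that is a prefix of candidate.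
import Mathlib
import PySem

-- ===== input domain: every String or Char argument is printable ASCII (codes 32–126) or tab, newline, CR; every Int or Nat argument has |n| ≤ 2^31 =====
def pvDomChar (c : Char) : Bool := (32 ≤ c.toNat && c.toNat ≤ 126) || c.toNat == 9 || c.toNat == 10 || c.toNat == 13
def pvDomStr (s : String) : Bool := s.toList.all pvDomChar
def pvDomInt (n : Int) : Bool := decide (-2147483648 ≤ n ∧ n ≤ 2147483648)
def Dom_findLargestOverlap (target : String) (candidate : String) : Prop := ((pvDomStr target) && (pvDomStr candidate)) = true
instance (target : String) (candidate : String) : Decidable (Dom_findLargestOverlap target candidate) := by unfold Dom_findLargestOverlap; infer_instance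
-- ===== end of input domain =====

-- B replaces A's exhaustive maximum-tracking loop over all overlap lengths by an early-exit
-- forward scan over start positions of the target suffix (objective: simpler).

-- ===== PORT A =====
def strandsAreEqualLengths (strand1 : String) (strand2 : String) : Bool :=
  let len1 := PySem.Str.len strand1
  let len2 := PySem.Str.len strand2
  let equal := decide (len1 = len2)
  equal

def findLargestOverlap (target : String) (candidate : String) : Int :=
  let equality := strandsAreEqualLengths target candidate
  if equality = true ∧ target ≠ "" then
    let length := PySem.Str.len target
    let lengthlist := PySem.List.pyRange 0 (length + 1) 1
    let longest : Int := 0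
    lengthlist.foldl (fun longest x =>
      let overlapBool :=
        decide (PySem.List.slice target.toList (some (-x)) none =
                PySem.List.slice candidate.toList (some 0) (some x))
      if overlapBool = true then
        if x > longest then x else longest
      else longest) longest
  else -1

-- ===== PORT B =====
-- the while loop of Source B: advance i until candidate.startswith(target[i:]); it always
-- terminates because target[len(target):] = '' is a prefix of anything
def overlapScan (target : List Char) (candidate : List Char) (i : Nat) : Nat :=
  if PySem.Chars.startswith candidate (PySem.List.slice target (some (i : Int)) none) then i
  else overlapScan target candidate (i + 1)
termination_by target.length - i
decreasing_by
  rename_i h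
  simp [PySem.List.slice_from_natCast, PySem.Chars.startswith] at h
  by_contra hlt
  exact h (by
    have : target.drop i = [] := List.drop_eq_nil_of_le (by omega)
    simp [this])

def findLargestOverlap_alt (target : String) (candidate : String) : Int :=
  if PySem.Str.len target ≠ PySem.Str.len candidate ∨ target = "" then -1
  else PySem.Str.len target - (overlapScan target.toList candidate.toList 0 : Int)

-- ===== PRECONDITION & SPEC =====
def Spec_findLargestOverlap (target : String) (candidate : String) (out : Int) : Prop := out = findLargestOverlap_alt target candidate
instance (target : String) (candidate : String) (out : Int) : Decidable (Spec_findLargestOverlap target candidate out) := by unfold Spec_findLargestOverlap; infer_instance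

-- ===== CLAIM (what is proved, stated in full; the proofs are below) =====
def Claim_equal_findLargestOverlap : Prop := ∀ (target : String) (candidate : String), Dom_findLargestOverlap target candidate → Spec_findLargestOverlap target candidate (findLargestOverlap target candidate)

-- ===== LEMMAS AND PROOFS =====

-- characterization of B's scan: it returns the least position j ≥ i whose suffix is a prefix
theorem overlapScan_spec (t c : List Char) :
    ∀ m i, t.length - i = m → i ≤ t.length →
      i ≤ overlapScan t c i ∧ overlapScan t c i ≤ t.length ∧
        (t.drop (overlapScan t c i)).isPrefixOf c = true ∧
        (∀ k, i ≤ k → k < overlapScan t c i → (t.drop k).isPrefixOf c = false) := by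
  intro m
  induction m with
  | zero =>
    intro i hm hle
    have hi : t.drop i = [] := List.drop_eq_nil_of_le (by omega)
    have hc : PySem.Chars.startswith c (PySem.List.slice t (some (i : Int)) none) = true := by
      simp [PySem.Chars.startswith, PySem.List.slice_from_natCast, hi]
    rw [overlapScan, if_pos hc]
    exact ⟨le_refl i, hle, by rw [hi]; rfl, fun k h1 h2 => absurd h2 (by omega)⟩
  | succ m ih =>
    intro i hm hle
    by_cases h : PySem.Chars.startswith c (PySem.List.slice t (some (i : Int)) none) = true
    · rw [overlapScan, if_pos h]
      have hpre : (t.drop i).isPrefixOf c = true := by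
        simpa [PySem.Chars.startswith, PySem.List.slice_from_natCast] using h
      exact ⟨le_refl i, hle, hpre, fun k h1 h2 => absurd h2 (by omega)⟩
    · rw [overlapScan, if_neg h]
      have hnp : (t.drop i).isPrefixOf c = false := by
        simpa [PySem.Chars.startswith, PySem.List.slice_from_natCast] using Bool.eq_false_iff.mpr h
      have hlt : i < t.length := by
        by_contra hgt
        have hi : t.drop i = [] := List.drop_eq_nil_of_le (by omega)
        rw [hi] at hnp
        simp [List.isPrefixOf] at hnp
      obtain ⟨ih1, ih2, ih3, ih4⟩ := ih (i + 1) (by omega) (by omega)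
      refine ⟨by omega, ih2, ih3, fun k h1 h2 => ?_⟩
      rcases Nat.eq_or_lt_of_le h1 with rfl | hklt
      · exact hnp
      · exact ih4 k (by omega) h2

-- characterization of A's fold: the result is acc or a q-satisfying element, and bounds all of them
theorem foldA_spec (q : Nat → Bool) (L : List Nat) (acc : Int) :
    acc ≤ L.foldl (fun a k => if q k = true then (if (k : Int) > a then (k : Int) else a) else a) acc ∧
    ((L.foldl (fun a k => if q k = true then (if (k : Int) > a then (k : Int) else a) else a) acc) = acc ∨
      ∃ k ∈ L, q k = true ∧ (L.foldl (fun a k => if q k = true then (if (k : Int) > a then (k : Int) else a) else a) acc) = (k : Int)) ∧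
    (∀ k ∈ L, q k = true → (k : Int) ≤ L.foldl (fun a k => if q k = true then (if (k : Int) > a then (k : Int) else a) else a) acc) := by
  induction L generalizing acc with
  | nil => simp
  | cons h tl ih =>
    simp only [List.foldl_cons]
    obtain ⟨ih1, ih2, ih3⟩ := ih (if q h = true then (if (h : Int) > acc then (h : Int) else acc) else acc)
    have hstep : acc ≤ (if q h = true then (if (h : Int) > acc then (h : Int) else acc) else acc) ∧
        ((if q h = true then (if (h : Int) > acc then (h : Int) else acc) else acc) = acc ∨
          (q h = true ∧ (if q h = true then (if (h : Int) > acc then (h : Int) else acc) else acc) = (h : Int))) ∧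
        (q h = true → (h : Int) ≤ (if q h = true then (if (h : Int) > acc then (h : Int) else acc) else acc)) := by
      split_ifs with h1 h2 <;> simp_all <;> omega
    obtain ⟨s1, s2, s3⟩ := hstep
    refine ⟨le_trans s1 ih1, ?_, ?_⟩
    · rcases ih2 with heq | ⟨k, hk, hqk, hr⟩
      · rcases s2 with h' | ⟨hq, h'⟩
        · exact Or.inl (by rw [heq, h'])
        · exact Or.inr ⟨h, List.mem_cons_self .., hq, by rw [heq, h']⟩
      · exact Or.inr ⟨k, List.mem_cons_of_mem _ hk, hqk, hr⟩
    · intro k hk hqk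
      rcases List.mem_cons.mp hk with rfl | hmem
      · exact le_trans (s3 hqk) ih1
      · exact ih3 k hmem hqk

-- ===== VERDICT (by name: the statement is the Claim_ definition above) =====
theorem findLargestOverlap_spec : Claim_equal_findLargestOverlap := by
  intro target candidate _
  unfold Spec_findLargestOverlap findLargestOverlap findLargestOverlap_alt strandsAreEqualLengths
  simp only [PySem.Str.len_eq, ne_eq]
  split_ifs with h1 h2 h2
  · rw [decide_eq_true_eq] at h1; tauto
  · -- main case: equal lengths, nonempty target
    rw [decide_eq_true_eq] at h1
    obtain ⟨hlenI, hne⟩ := h1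
    have ht : target.toList ≠ [] := fun h => hne (String.toList_eq_nil_iff.mp h)
    set t := target.toList with hts
    set c := candidate.toList with hcs
    set n := t.length with hns
    -- rewrite the pyRange fold into a fold over List.range (n+1)
    rw [PySem.List.pyRange_one]
    have htn : ((n : Int) + 1 - 0).toNat = n + 1 := by omega
    rw [htn, List.foldl_map]
    simp only [zero_add]
    -- the scan characterization
    obtain ⟨hs1, hs2, hs3, hs4⟩ := overlapScan_spec t c n 0 (by omega) (by omega)
    set j := overlapScan t c 0 with hj
    -- the fold characterization
    have hA := foldA_spec (fun k : Nat =>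
      decide (PySem.List.slice t (some (-(k : Int))) none =
              PySem.List.slice c (some 0) (some (k : Int)))) (List.range (n + 1)) 0
    simp only [] at hA
    obtain ⟨hA1, hA2, hA3⟩ := hA
    -- facts about the per-length test
    have hq0 : decide (PySem.List.slice t (some (-((0 : Nat) : Int))) none =
        PySem.List.slice c (some 0) (some ((0 : Nat) : Int))) = false := by
      simp only [Nat.cast_zero, neg_zero, PySem.List.slice_zero_start,
        PySem.List.slice_none_none, decide_eq_false_iff_not]
      intro h
      apply ht
      have h0 : PySem.List.slice c none (some ((0 : Nat) : Int)) = [] := by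
        rw [PySem.List.slice_to_natCast]; simp
      simpa using h.trans (by simpa using h0)
    have hqk : ∀ k, 1 ≤ k → k ≤ n →
        ((decide (PySem.List.slice t (some (-(k : Int))) none =
          PySem.List.slice c (some 0) (some (k : Int))) = true) ↔
          (t.drop (n - k)).isPrefixOf c = true) := by
      intro k h1k hkn
      rw [PySem.List.slice_from_neg_natCast t k (by omega), PySem.List.slice_zero_start,
        PySem.List.slice_to_natCast, decide_eq_true_eq, List.isPrefixOf_iff_prefix,
        List.prefix_iff_eq_take]
      have hlendrop : (t.drop (n - k)).length = k := by
        rw [List.length_drop]; omega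
      rw [hlendrop]
    have hcast : (n : Int) - (j : Int) = ((n - j : Nat) : Int) := by
      rw [Nat.cast_sub hs2]
    rw [hcast]
    apply le_antisymm
    · rcases hA2 with h0 | ⟨k, hk, hqk', hrk⟩
      · rw [h0]; positivity
      · have hkn : k ≤ n := by
          have := List.mem_range.mp hk; omega
        have hk1 : 1 ≤ k := by
          rcases Nat.eq_zero_or_pos k with rfl | h
          · rw [hq0] at hqk'; exact absurd hqk' (by simp)
          · exact h
        have hpre : (t.drop (n - k)).isPrefixOf c = true := (hqk k hk1 hkn).mp hqk'
        have hjle : j ≤ n - k := by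
          by_contra hlt
          have := hs4 (n - k) (by omega) (by omega)
          rw [hpre] at this; exact absurd this (by simp)
        rw [hrk]
        exact_mod_cast (by omega : k ≤ n - j)
    · rcases Nat.eq_or_lt_of_le hs2 with hje | hjlt
      · have h0 : n - j = 0 := by omega
        rw [h0]; exact_mod_cast hA1
      · have h1k : 1 ≤ n - j := by omega
        have hqnj : decide (PySem.List.slice t (some (-((n - j : Nat) : Int))) none =
            PySem.List.slice c (some 0) (some ((n - j : Nat) : Int))) = true := by
          rw [hqk (n - j) h1k (by omega)]
          have hnn : n - (n - j) = j := by omega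
          rw [hnn]; exact hs3
        exact hA3 (n - j) (List.mem_range.mpr (by omega)) hqnj
  · rfl
  · rw [decide_eq_true_eq] at h1
    rcases not_or.mp h2 with ⟨hne2, hemp⟩
    exact absurd ⟨not_not.mp hne2, hemp⟩ h1
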